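-- pv_equiv track=rewrite | github.com/Equix12/NMIAI | astar-island/solve_v2.py | generate_viewports
-- ===== SOURCE A (Python) =====
-- def generate_viewports(width, height, max_vp=15):
--     """Generate viewports for full map coverage."""
--     viewports = []
--     step = max_vp - 2  # 13
--     for vy in range(0, height, step):
--         for vx in range(0, width, step):
--             x = min(vx, max(0, width - max_vp))
--             y = min(vy, max(0, height - max_vp))
--             w = min(max_vp, width - x)
--             h = min(max_vp, height - y)
--             vp = (x, y, w, h)
--             if vp not in viewports:
--                 viewports.append(vp)
--     return viewports
-- ===== SOURCE B (Python) =====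
-- def generate_viewports(width, height, max_vp=15):
--     """Generate viewports for full map coverage."""
--     step = max_vp - 2
--     ys = []
--     for vy in range(0, height, step):
--         y = min(vy, max(0, height - max_vp))
--         q = (y, min(max_vp, height - y))
--         if q not in ys:
--             ys.append(q)
--     if not ys:
--         return []
--     xs = []
--     for vx in range(0, width, step):
--         x = min(vx, max(0, width - max_vp))
--         p = (x, min(max_vp, width - x))
--         if p not in xs:
--             xs.append(p)
--     return [(x, y, w, h) for (y, h) in ys for (x, w) in xs]
-- ===== Notes on version B (the rewrite author's own statement) =====
-- stated objective: alternative
-- what changed: Replaces the nested 2-D loop that dedups full (x,y,w,h) tuples against the whole output list with two independent 1-D dedup scans over the x-axis and y-axis, combined by a Cartesian product (y-outer, x-inner), exploiting that x,w depend only on vx and y,h only on vy; the membership scans shrink from the full viewport list to the two axis lists, though a timing run could not measure a difference at its sizes.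
import Mathlib
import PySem

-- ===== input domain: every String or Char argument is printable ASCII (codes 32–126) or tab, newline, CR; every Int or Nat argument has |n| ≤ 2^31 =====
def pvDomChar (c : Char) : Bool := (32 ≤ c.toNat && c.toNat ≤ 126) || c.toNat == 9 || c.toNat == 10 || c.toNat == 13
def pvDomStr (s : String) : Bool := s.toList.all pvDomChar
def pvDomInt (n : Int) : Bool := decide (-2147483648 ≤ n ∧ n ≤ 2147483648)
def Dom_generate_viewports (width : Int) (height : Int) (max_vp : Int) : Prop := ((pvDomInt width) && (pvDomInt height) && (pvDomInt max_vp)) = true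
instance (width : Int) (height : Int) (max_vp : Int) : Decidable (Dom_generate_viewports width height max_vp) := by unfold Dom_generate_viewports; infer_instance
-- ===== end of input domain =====

-- B factors the nested dedup loop into two independent 1-D dedup scans (x-axis and y-axis) combined
-- by a Cartesian product; membership scans run over the two axis lists instead of the full viewport list (objective: alternative).

-- ===== PORT A =====
def generate_viewports (width : Int) (height : Int) (max_vp : Int) : List (List Int) :=
  let step := max_vp - 2
  (PySem.List.pyRange 0 height step).foldl (fun viewports vy =>
    (PySem.List.pyRange 0 width step).foldl (fun viewports vx =>
      let x := min vx (max 0 (width - max_vp))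
      let y := min vy (max 0 (height - max_vp))
      let w := min max_vp (width - x)
      let h := min max_vp (height - y)
      let vp := [x, y, w, h]
      if vp ∈ viewports then viewports else viewports ++ [vp]) viewports) []

-- ===== PORT B =====
def generate_viewports_alt (width : Int) (height : Int) (max_vp : Int) : List (List Int) :=
  let step := max_vp - 2
  let ys := (PySem.List.pyRange 0 height step).foldl (fun ys vy =>
      let y := min vy (max 0 (height - max_vp))
      let q := (y, min max_vp (height - y))
      if q ∈ ys then ys else ys ++ [q]) []
  if ys = [] then []
  else
    let xs := (PySem.List.pyRange 0 width step).foldl (fun xs vx =>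
        let x := min vx (max 0 (width - max_vp))
        let p := (x, min max_vp (width - x))
        if p ∈ xs then xs else xs ++ [p]) []
    ys.flatMap (fun q => xs.map (fun p => [p.1, q.1, p.2, q.2]))

-- ===== PRECONDITION & SPEC =====
-- Pre_ excludes exactly max_vp = 2, where Python's range(0, _, 0) raises ValueError (step == 0) in both A and B.
def Pre_generate_viewports (width : Int) (height : Int) (max_vp : Int) : Prop := max_vp ≠ 2
instance (width : Int) (height : Int) (max_vp : Int) : Decidable (Pre_generate_viewports width height max_vp) := by unfold Pre_generate_viewports; infer_instance
def pvWitness_generate_viewports : Int × Int × Int := (30, 30, 15)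

def Spec_generate_viewports (width : Int) (height : Int) (max_vp : Int) (out : List (List Int)) : Prop := out = generate_viewports_alt width height max_vp
instance (width : Int) (height : Int) (max_vp : Int) (out : List (List Int)) : Decidable (Spec_generate_viewports width height max_vp out) := by unfold Spec_generate_viewports; infer_instance

-- ===== CLAIM (what is proved, stated in full; the proofs are below) =====
def Claim_equal_generate_viewports : Prop := ∀ (width : Int) (height : Int) (max_vp : Int), Dom_generate_viewports width height max_vp → Pre_generate_viewports width height max_vp → Spec_generate_viewports width height max_vp (generate_viewports width height max_vp)

-- ===== LEMMAS AND PROOFS =====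

-- the 1-D dedup fold (shape of B's xs/ys loops and of the generic form of A's loop)
def pvDedup (f : Int → Int × Int) (S : List (Int × Int)) (l : List Int) : List (Int × Int) :=
  l.foldl (fun s v => if f v ∈ s then s else s ++ [f v]) S

lemma pvDedup_cons (f : Int → Int × Int) (S : List (Int × Int)) (v : Int) (l : List Int) :
    pvDedup f S (v :: l) = pvDedup f (if f v ∈ S then S else S ++ [f v]) l := by
  simp [pvDedup, List.foldl]

lemma pvDedup_mono (f : Int → Int × Int) (S : List (Int × Int)) (l : List Int) (c : Int × Int)
    (h : c ∈ S) : c ∈ pvDedup f S l := by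
  induction l generalizing S with
  | nil => exact h
  | cons v l ih =>
    rw [pvDedup_cons]
    apply ih
    split <;> simp [h]

lemma mem_pvDedup (f : Int → Int × Int) (S : List (Int × Int)) (l : List Int) (v : Int)
    (h : v ∈ l) : f v ∈ pvDedup f S l := by
  induction l generalizing S with
  | nil => cases h
  | cons u l ih =>
    rw [pvDedup_cons]
    rcases List.mem_cons.mp h with rfl | hv
    · apply pvDedup_mono
      split
      · assumption
      · simp
    · exact ih _ hv

-- how A's inner-loop tuple decomposes: [c.1, d.1, c.2, d.2] equality is componentwise
lemma pvComb_inj (c c' d d' : Int × Int) :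
    ([c.1, d.1, c.2, d.2] : List Int) = [c'.1, d'.1, c'.2, d'.2] ↔ c = c' ∧ d = d' := by
  constructor
  · intro h
    simp only [List.cons.injEq, and_true] at h
    exact ⟨Prod.ext h.1 h.2.2.1, Prod.ext h.2.1 h.2.2.2⟩
  · rintro ⟨rfl, rfl⟩; rfl

-- membership in a product block
lemma pvMem_block (c d : Int × Int) (D X : List (Int × Int)) :
    ([c.1, d.1, c.2, d.2] : List Int) ∈ D.flatMap (fun q => X.map (fun p => [p.1, q.1, p.2, q.2])) ↔
      c ∈ X ∧ d ∈ D := by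
  simp only [List.mem_flatMap, List.mem_map]
  constructor
  · rintro ⟨q, hq, p, hp, h⟩
    rcases (pvComb_inj p c q d).mp h with ⟨rfl, rfl⟩
    exact ⟨hp, hq⟩
  · rintro ⟨hc, hd⟩
    exact ⟨d, hd, c, hc, rfl⟩

-- A's inner loop, when the row value d was already produced, adds nothing
lemma pvInner_noop (f : Int → Int × Int) (d : Int × Int) (l : List Int) (acc : List (List Int))
    (h : ∀ v ∈ l, ([(f v).1, d.1, (f v).2, d.2] : List Int) ∈ acc) :
    l.foldl (fun acc vx =>
      if ([(f vx).1, d.1, (f vx).2, d.2] : List Int) ∈ acc then acc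
      else acc ++ [[(f vx).1, d.1, (f vx).2, d.2]]) acc = acc := by
  induction l with
  | nil => rfl
  | cons v l ih =>
    simp only [List.foldl_cons, if_pos (h v (List.mem_cons_self))]
    exact ih fun u hu => h u (List.mem_cons_of_mem _ hu)

-- A's inner loop on a fresh row value d mirrors the 1-D dedup fold
lemma pvInner_fresh (f : Int → Int × Int) (d : Int × Int) (acc0 : List (List Int))
    (h0 : ∀ c : Int × Int, ([c.1, d.1, c.2, d.2] : List Int) ∉ acc0) :
    ∀ (l : List Int) (S : List (Int × Int)),
    l.foldl (fun acc vx =>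
      if ([(f vx).1, d.1, (f vx).2, d.2] : List Int) ∈ acc then acc
      else acc ++ [[(f vx).1, d.1, (f vx).2, d.2]])
      (acc0 ++ S.map (fun p => [p.1, d.1, p.2, d.2]))
    = acc0 ++ (pvDedup f S l).map (fun p => [p.1, d.1, p.2, d.2]) := by
  intro l
  induction l with
  | nil => intro S; rfl
  | cons v l ih =>
    intro S
    have hmem : (([(f v).1, d.1, (f v).2, d.2] : List Int)
        ∈ acc0 ++ S.map (fun p => [p.1, d.1, p.2, d.2])) ↔ f v ∈ S := by
      simp only [List.mem_append, List.mem_map]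
      constructor
      · rintro (h | ⟨p, hp, h⟩)
        · exact absurd h (h0 _)
        · rcases (pvComb_inj p (f v) d d).mp h with ⟨rfl, -⟩
          exact hp
      · intro h; exact Or.inr ⟨f v, h, rfl⟩
    rw [List.foldl_cons, pvDedup_cons]
    by_cases hv : f v ∈ S
    · rw [if_pos (hmem.mpr hv), if_pos hv]
      exact ih S
    · rw [if_neg (fun h => hv (hmem.mp h)), if_neg hv]
      have : acc0 ++ S.map (fun p => [p.1, d.1, p.2, d.2]) ++ [[(f v).1, d.1, (f v).2, d.2]]
          = acc0 ++ (S ++ [f v]).map (fun p => [p.1, d.1, p.2, d.2]) := by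
        simp
      rw [this]
      exact ih (S ++ [f v])

-- B's early empty-rows return is invisible in the result
lemma pvIf_empty {α β : Type} (ys : List α) (f : α → List β) :
    (if ys = [] then [] else ys.flatMap f) = ys.flatMap f := by
  cases ys <;> simp

-- the outer loop: nested dedup over rows = dedup of row values flat-mapped over the fixed column dedup
lemma pvOuter (f g : Int → Int × Int) (la : List Int) :
    ∀ (lb : List Int) (D : List (Int × Int)),
    lb.foldl (fun acc vy =>
      la.foldl (fun acc vx =>
        if ([(f vx).1, (g vy).1, (f vx).2, (g vy).2] : List Int) ∈ acc then acc
        else acc ++ [[(f vx).1, (g vy).1, (f vx).2, (g vy).2]]) acc)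
      (D.flatMap (fun q => (pvDedup f [] la).map (fun p => [p.1, q.1, p.2, q.2])))
    = (pvDedup g D lb).flatMap (fun q => (pvDedup f [] la).map (fun p => [p.1, q.1, p.2, q.2])) := by
  intro lb
  induction lb with
  | nil => intro D; rfl
  | cons vy lb ih =>
    intro D
    rw [List.foldl_cons, pvDedup_cons]
    by_cases hd : g vy ∈ D
    · rw [if_pos hd]
      have hno := pvInner_noop f (g vy) la
        (D.flatMap (fun q => (pvDedup f [] la).map (fun p => [p.1, q.1, p.2, q.2])))
        (fun v hv => (pvMem_block (f v) (g vy) D (pvDedup f [] la)).mpr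
          ⟨mem_pvDedup f [] la v hv, hd⟩)
      rw [hno]
      exact ih D
    · rw [if_neg hd]
      have h0 : ∀ c : Int × Int, ([c.1, (g vy).1, c.2, (g vy).2] : List Int)
          ∉ D.flatMap (fun q => (pvDedup f [] la).map (fun p => [p.1, q.1, p.2, q.2])) := by
        intro c hc
        exact hd ((pvMem_block c (g vy) D (pvDedup f [] la)).mp hc).2
      have hfresh := pvInner_fresh f (g vy) _ h0 la []
      rw [List.map_nil, List.append_nil] at hfresh
      rw [hfresh]
      have : (D.flatMap (fun q => (pvDedup f [] la).map (fun p => [p.1, q.1, p.2, q.2])))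
          ++ (pvDedup f [] la).map (fun p => [p.1, (g vy).1, p.2, (g vy).2])
          = (D ++ [g vy]).flatMap (fun q => (pvDedup f [] la).map (fun p => [p.1, q.1, p.2, q.2])) := by
        simp
      rw [this]
      exact ih (D ++ [g vy])

-- ===== VERDICT (by name: the statement is the Claim_ definition above) =====
theorem generate_viewports_spec : Claim_equal_generate_viewports := by
  intro width height max_vp _ _
  show generate_viewports width height max_vp = generate_viewports_alt width height max_vp
  unfold generate_viewports generate_viewports_alt
  have := pvOuter
    (fun vx => (min vx (max 0 (width - max_vp)),
                min max_vp (width - min vx (max 0 (width - max_vp)))))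
    (fun vy => (min vy (max 0 (height - max_vp)),
                min max_vp (height - min vy (max 0 (height - max_vp)))))
    (PySem.List.pyRange 0 width (max_vp - 2))
    (PySem.List.pyRange 0 height (max_vp - 2)) []
  simpa [pvDedup, pvIf_empty] using this
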